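-- pv_equiv track=rewrite | github.com/isb-cgc/examples-Python | python/pairwise/filter_and_annot.py | updateFFdict
-- ===== SOURCE A (Python) =====
-- def addItem(ffdict, mode, ki, qid):
--     if mode == 'tablevar':
--         if 'tablevar' not in ffdict.keys():
--             ffdict['tablevar'] = ffdict[ki]
--         else:
--             ffdict['tablevar'] = ffdict['tablevar'] + ",\n" + ffdict[ki]
--
--     if mode == 'tablevar2':
--         if 'tablevar2' not in ffdict.keys():
--             ffdict['tablevar2'] = ffdict[ki] + " AS " + ffdict[ki] + "_J" + qid
--             ffdict['tablevar_rename'] = ffdict[ki] + "_J" + qid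
--         else:
--             ffdict['tablevar2'] = ffdict['tablevar2'] + ",\n" + ffdict[ki] + " AS " + ffdict[ki] + "_J" + qid
--             ffdict['tablevar_rename'] = ffdict['tablevar_rename'] + ",\n" + ffdict[ki] + "_J" + qid
--
--     if mode == 'annotvar':
--         if 'annotvar' not in ffdict.keys():
--             ffdict['annotvar'] = ffdict[ki]
--         else:
--             ffdict['annotvar'] = ffdict['annotvar'] + ",\n" + ffdict[ki]
--
--     if mode == 'annotvar2':
--         if 'annotvar2' not in ffdict.keys():
--             ffdict['annotvar2'] = ffdict[ki] + " AS " + ffdict[ki] + "_J" + qid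
--             ffdict['annotvar_rename'] = ffdict[ki] + "_J" + qid
--         else:
--             ffdict['annotvar2'] = ffdict['annotvar2'] + ",\n" + ffdict[ki] + " AS " + ffdict[ki] + "_J" + qid
--             ffdict['annotvar_rename'] = ffdict['annotvar_rename'] + ",\n" + ffdict[ki] + "_J" + qid
--
--     if mode == 'groupby':
--         if 'groupby' not in ffdict.keys():
--             ffdict['groupby'] = ffdict[ki]
--         else:
--             ffdict['groupby'] = ffdict['groupby'] + ",\n" + ffdict[ki]
--
--     if mode == 'groupby2':
--         if 'groupby2' not in ffdict.keys():
--             ffdict['groupby2'] = ffdict[ki] + "_J" + qid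
--         else:
--             ffdict['groupby2'] = ffdict['groupby2'] + ",\n" + ffdict[ki] + "_J" + qid
--
--     return(ffdict)
--
-- def updateFFdict(ffdict, qid):
--     ks = list(ffdict.keys())
--     for ki in ks:
--         if ki in ['tablekey','tablejoin','tablegroup', 'valuevar']:
--             ffdict = addItem(ffdict, 'tablevar', ki, qid)
--             ffdict = addItem(ffdict, 'tablevar2', ki, qid)
--         if ki in ['annotkey', 'annotjoin', 'annotgroup']:
--             ffdict = addItem(ffdict, 'annotvar', ki, qid)
--             ffdict = addItem(ffdict, 'annotvar2', ki, qid)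
--         if ki in ['annotgroup','tablegroup']:
--             ffdict = addItem(ffdict, 'groupby', ki, qid)
--             ffdict = addItem(ffdict, 'groupby2', ki, qid)
--         if ki in ['annotjoin', 'tablejoin']:
--             ffdict['joinkey'] = ffdict[ki]
--             ffdict['joinkey'] = ffdict[ki] + "_J" + qid
--         if ki == 'valuevar':
--             ffdict['valuevar2'] = ffdict['valuevar'] + "_J" + qid
--     return(ffdict)
-- ===== SOURCE B (Python) =====
-- def updateFFdict(ffdict, qid):
--     # Gather-then-join: one pass classifies each original key and collects the
--     # fragment strings per output key (in first-touch order); a final pass joins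
--     # each collected list with ",\n" and stores it.  Mutates ffdict like A does.
--     acc = {}  # output key -> list of fragments, keys in first-touch order
--
--     def gather(key, frag, seedkey):
--         if key not in acc:
--             acc[key] = [ffdict[key]] if seedkey in ffdict else []
--         acc[key].append(frag)
--
--     for ki in list(ffdict.keys()):
--         v = ffdict[ki]
--         if ki in ('tablekey', 'tablejoin', 'tablegroup', 'valuevar'):
--             gather('tablevar', v, 'tablevar')
--             gather('tablevar2', v + ' AS ' + v + '_J' + qid, 'tablevar2')
--             gather('tablevar_rename', v + '_J' + qid, 'tablevar2')
--         if ki in ('annotkey', 'annotjoin', 'annotgroup'):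
--             gather('annotvar', v, 'annotvar')
--             gather('annotvar2', v + ' AS ' + v + '_J' + qid, 'annotvar2')
--             gather('annotvar_rename', v + '_J' + qid, 'annotvar2')
--         if ki in ('annotgroup', 'tablegroup'):
--             gather('groupby', v, 'groupby')
--             gather('groupby2', v + '_J' + qid, 'groupby2')
--         if ki in ('annotjoin', 'tablejoin'):
--             acc['joinkey'] = [v + '_J' + qid]
--         if ki == 'valuevar':
--             acc['valuevar2'] = [v + '_J' + qid]
--
--     for key, parts in acc.items():
--         ffdict[key] = ',\n'.join(parts)
--     return ffdict
-- ===== Notes on version B (the rewrite author's own statement) =====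
-- stated objective: alternative
-- what changed: A grows each SQL fragment string via addItem's key-sentinel checks and repeated string concatenation interleaved with dict reads; B makes one classification pass that collects per-output-key fragment lists (seeded from a pre-existing entry) plus last-wins values for joinkey/valuevar2, then writes each key once as a ',\n'.join of its list.
-- outside the precondition, e.g. on updateFFdict({'tablekey': 'g', 'tablevar2': 't'}, '1'): A raises KeyError, B raises KeyError
import Mathlib
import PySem

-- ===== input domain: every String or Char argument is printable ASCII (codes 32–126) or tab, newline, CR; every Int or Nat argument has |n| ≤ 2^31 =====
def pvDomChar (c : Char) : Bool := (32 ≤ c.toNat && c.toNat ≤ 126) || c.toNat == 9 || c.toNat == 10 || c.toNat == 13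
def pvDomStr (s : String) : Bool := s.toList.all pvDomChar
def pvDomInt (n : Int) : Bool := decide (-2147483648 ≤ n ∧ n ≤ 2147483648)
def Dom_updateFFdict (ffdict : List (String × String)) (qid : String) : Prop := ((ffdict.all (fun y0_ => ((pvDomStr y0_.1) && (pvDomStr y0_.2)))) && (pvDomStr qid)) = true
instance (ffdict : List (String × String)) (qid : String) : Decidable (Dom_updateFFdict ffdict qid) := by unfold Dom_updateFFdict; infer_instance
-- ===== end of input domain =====

-- B replaces A's sentinel-guarded incremental string concatenation by a gather-then-join
-- pass (classify each key once, collect per-output-key fragment lists, join at the end);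
-- objective: an alternative, plainer decomposition with the same result (both Pythons
-- mutate the argument dict identically, so the return-value equivalence covers the side
-- effect as well).

-- ===== PORT A =====
def pvAddItem (d : PySem.Dict String String) (mode ki qid : String) : PySem.Dict String String :=
  let d := if mode == "tablevar" then
      if !(d.contains "tablevar") then d.insert "tablevar" (d.getD ki "")
      else d.insert "tablevar" (d.getD "tablevar" "" ++ ",\n" ++ d.getD ki "")
    else d
  let d := if mode == "tablevar2" then
      if !(d.contains "tablevar2") then
        let d := d.insert "tablevar2" (d.getD ki "" ++ " AS " ++ d.getD ki "" ++ "_J" ++ qid)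
        d.insert "tablevar_rename" (d.getD ki "" ++ "_J" ++ qid)
      else
        let d := d.insert "tablevar2" (d.getD "tablevar2" "" ++ ",\n" ++ d.getD ki "" ++ " AS " ++ d.getD ki "" ++ "_J" ++ qid)
        d.insert "tablevar_rename" (d.getD "tablevar_rename" "" ++ ",\n" ++ d.getD ki "" ++ "_J" ++ qid)
    else d
  let d := if mode == "annotvar" then
      if !(d.contains "annotvar") then d.insert "annotvar" (d.getD ki "")
      else d.insert "annotvar" (d.getD "annotvar" "" ++ ",\n" ++ d.getD ki "")
    else d
  let d := if mode == "annotvar2" then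
      if !(d.contains "annotvar2") then
        let d := d.insert "annotvar2" (d.getD ki "" ++ " AS " ++ d.getD ki "" ++ "_J" ++ qid)
        d.insert "annotvar_rename" (d.getD ki "" ++ "_J" ++ qid)
      else
        let d := d.insert "annotvar2" (d.getD "annotvar2" "" ++ ",\n" ++ d.getD ki "" ++ " AS " ++ d.getD ki "" ++ "_J" ++ qid)
        d.insert "annotvar_rename" (d.getD "annotvar_rename" "" ++ ",\n" ++ d.getD ki "" ++ "_J" ++ qid)
    else d
  let d := if mode == "groupby" then
      if !(d.contains "groupby") then d.insert "groupby" (d.getD ki "")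
      else d.insert "groupby" (d.getD "groupby" "" ++ ",\n" ++ d.getD ki "")
    else d
  let d := if mode == "groupby2" then
      if !(d.contains "groupby2") then d.insert "groupby2" (d.getD ki "" ++ "_J" ++ qid)
      else d.insert "groupby2" (d.getD "groupby2" "" ++ ",\n" ++ d.getD ki "" ++ "_J" ++ qid)
    else d
  d

def pvLoopA (qid : String) (d : PySem.Dict String String) (ki : String) : PySem.Dict String String :=
  let d := if ["tablekey","tablejoin","tablegroup","valuevar"].contains ki then
      pvAddItem (pvAddItem d "tablevar" ki qid) "tablevar2" ki qid
    else d
  let d := if ["annotkey","annotjoin","annotgroup"].contains ki then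
      pvAddItem (pvAddItem d "annotvar" ki qid) "annotvar2" ki qid
    else d
  let d := if ["annotgroup","tablegroup"].contains ki then
      pvAddItem (pvAddItem d "groupby" ki qid) "groupby2" ki qid
    else d
  let d := if ["annotjoin","tablejoin"].contains ki then
      let d := d.insert "joinkey" (d.getD ki "")
      d.insert "joinkey" (d.getD ki "" ++ "_J" ++ qid)
    else d
  let d := if ki == "valuevar" then
      d.insert "valuevar2" (d.getD "valuevar" "" ++ "_J" ++ qid)
    else d
  d

def updateFFdict (ffdict : List (String × String)) (qid : String) : List (String × String) :=
  let d0 := PySem.Dict.ofList ffdict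
  let ks := d0.keys
  (ks.foldl (pvLoopA qid) d0).items

-- ===== PORT B =====
def pvJoin (ps : List String) : String := PySem.Str.join ",\n" ps

def pvGather (ffd : PySem.Dict String String) (acc : PySem.Dict String (List String))
    (key frag seedkey : String) : PySem.Dict String (List String) :=
  let acc := if !(acc.contains key) then
      acc.insert key (if ffd.contains seedkey then [ffd.getD key ""] else [])
    else acc
  acc.modify key [] (fun l => l ++ [frag])

def pvLoopB (ffd : PySem.Dict String String) (qid : String)
    (acc : PySem.Dict String (List String)) (ki : String) : PySem.Dict String (List String) :=
  let v := ffd.getD ki ""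
  let acc := if ["tablekey","tablejoin","tablegroup","valuevar"].contains ki then
      let acc := pvGather ffd acc "tablevar" v "tablevar"
      let acc := pvGather ffd acc "tablevar2" (v ++ " AS " ++ v ++ "_J" ++ qid) "tablevar2"
      pvGather ffd acc "tablevar_rename" (v ++ "_J" ++ qid) "tablevar2"
    else acc
  let acc := if ["annotkey","annotjoin","annotgroup"].contains ki then
      let acc := pvGather ffd acc "annotvar" v "annotvar"
      let acc := pvGather ffd acc "annotvar2" (v ++ " AS " ++ v ++ "_J" ++ qid) "annotvar2"
      pvGather ffd acc "annotvar_rename" (v ++ "_J" ++ qid) "annotvar2"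
    else acc
  let acc := if ["annotgroup","tablegroup"].contains ki then
      let acc := pvGather ffd acc "groupby" v "groupby"
      pvGather ffd acc "groupby2" (v ++ "_J" ++ qid) "groupby2"
    else acc
  let acc := if ["annotjoin","tablejoin"].contains ki then
      acc.insert "joinkey" [v ++ "_J" ++ qid]
    else acc
  let acc := if ki == "valuevar" then
      acc.insert "valuevar2" [v ++ "_J" ++ qid]
    else acc
  acc

def pvWriteback (d : PySem.Dict String String) (acc : PySem.Dict String (List String)) :
    PySem.Dict String String :=
  acc.items.foldl (fun d p => d.insert p.1 (pvJoin p.2)) d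

def updateFFdict_alt (ffdict : List (String × String)) (qid : String) : List (String × String) :=
  let d0 := PySem.Dict.ofList ffdict
  let acc := d0.keys.foldl (pvLoopB d0 qid) PySem.Dict.empty
  (pvWriteback d0 acc).items

-- ===== PRECONDITION & SPEC =====
def pvHasKey (ffdict : List (String × String)) (k : String) : Prop := k ∈ ffdict.map (fun p => p.1)

-- Pre_ excludes exactly the inputs on which the Python A raises KeyError: a dict holding
-- 'tablevar2' without 'tablevar_rename' together with a table trigger key (or the annot
-- analog) makes addItem read the missing *_rename key; B raises identically there.
def Pre_updateFFdict (ffdict : List (String × String)) (qid : String) : Prop :=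
  ¬((pvHasKey ffdict "tablekey" ∨ pvHasKey ffdict "tablejoin" ∨ pvHasKey ffdict "tablegroup" ∨ pvHasKey ffdict "valuevar") ∧
      pvHasKey ffdict "tablevar2" ∧ ¬ pvHasKey ffdict "tablevar_rename") ∧
  ¬((pvHasKey ffdict "annotkey" ∨ pvHasKey ffdict "annotjoin" ∨ pvHasKey ffdict "annotgroup") ∧
      pvHasKey ffdict "annotvar2" ∧ ¬ pvHasKey ffdict "annotvar_rename")

instance (ffdict : List (String × String)) (qid : String) : Decidable (Pre_updateFFdict ffdict qid) := by
  unfold Pre_updateFFdict pvHasKey; infer_instance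

def pvWitness_updateFFdict : (List (String × String)) × String :=
  ([("tablekey", "gexp.gene"), ("annotjoin", "an.id"), ("valuevar", "gexp.val")], "1")

def Spec_updateFFdict (ffdict : List (String × String)) (qid : String) (out : List (String × String)) : Prop := out = updateFFdict_alt ffdict qid
instance (ffdict : List (String × String)) (qid : String) (out : List (String × String)) : Decidable (Spec_updateFFdict ffdict qid out) := by unfold Spec_updateFFdict; infer_instance

-- ===== CLAIM (what is proved, stated in full; the proofs are below) =====
def Claim_equal_updateFFdict : Prop := ∀ (ffdict : List (String × String)) (qid : String), Dom_updateFFdict ffdict qid → Pre_updateFFdict ffdict qid → Spec_updateFFdict ffdict qid (updateFFdict ffdict qid)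

-- ===== LEMMAS AND PROOFS =====

-- ---- facts about joining with ",\n" ----
theorem pvJoin_singleton (x : String) : pvJoin [x] = x := by
  simp [pvJoin, PySem.Str.join, String.ofList_toList]

theorem pvIntercalate_append_singleton (sep x : List Char) (xs : List (List Char)) (h : xs ≠ []) :
    sep.intercalate (xs ++ [x]) = sep.intercalate xs ++ sep ++ x := by
  induction xs with
  | nil => simp at h
  | cons y ys ih =>
    cases ys with
    | nil => simp [List.intercalate, List.intersperse]
    | cons z zs =>
      have h2 : (z :: zs : List (List Char)) ≠ [] := by simp
      have e1 : sep.intercalate (y :: z :: zs) = y ++ sep ++ sep.intercalate (z :: zs) := by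
        simp [List.intercalate, List.intersperse]
      have e2 : sep.intercalate (y :: ((z :: zs) ++ [x])) = y ++ sep ++ sep.intercalate ((z :: zs) ++ [x]) := by
        cases zs <;> simp [List.intercalate, List.intersperse]
      simp only [List.cons_append] at *
      rw [e2, ih h2, e1]
      simp [List.append_assoc]

theorem pvJoin_append (ps : List String) (x : String) (h : ps ≠ []) :
    pvJoin (ps ++ [x]) = pvJoin ps ++ ",\n" ++ x := by
  have hm : (ps.map String.toList) ≠ [] := by simpa using h
  simp only [pvJoin, PySem.Str.join, PySem.Chars.join, List.map_append, List.map_cons, List.map_nil]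
  rw [pvIntercalate_append_singleton _ _ _ hm]
  simp only [String.ofList_append, String.ofList_toList]

-- ---- facts about the write-back fold ----
theorem pvWb_contains (l : List (String × List String)) (d : PySem.Dict String String) (k : String) :
    (l.foldl (fun d p => d.insert p.1 (pvJoin p.2)) d).contains k
      = (l.any (fun p => p.1 == k) || d.contains k) := by
  induction l generalizing d with
  | nil => rfl
  | cons p t ih =>
    simp only [List.foldl_cons, List.any_cons, ih, PySem.Dict.contains_insert]
    by_cases hpk : p.1 = k
    · simp [hpk]
    · have h1 : ¬ k = p.1 := fun h => hpk h.symm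
      have e1 : ((k : String) == p.1) = false := beq_eq_false_iff_ne.mpr h1
      have e2 : ((p.1 : String) == k) = false := beq_eq_false_iff_ne.mpr hpk
      rw [e1, e2, Bool.false_or, Bool.false_or]

theorem pvWb_getD_not_mem (l : List (String × List String)) (d : PySem.Dict String String) (k : String)
    (h : l.any (fun p => p.1 == k) = false) :
    (l.foldl (fun d p => d.insert p.1 (pvJoin p.2)) d).getD k "" = d.getD k "" := by
  induction l generalizing d with
  | nil => rfl
  | cons p t ih =>
    simp only [List.any_cons, Bool.or_eq_false_iff] at h
    have hne : k ≠ p.1 := by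
      intro he
      rw [he] at h
      simp at h
    simp only [List.foldl_cons]
    rw [ih _ h.2, PySem.Dict.getD_insert_of_ne _ _ _ hne]

theorem pvWb_getD_mem (l : List (String × List String)) (d : PySem.Dict String String)
    (k : String) (ps : List String)
    (hnd : (l.map (fun p => p.1)).Nodup) (hm : (k, ps) ∈ l) :
    (l.foldl (fun d p => d.insert p.1 (pvJoin p.2)) d).getD k "" = pvJoin ps := by
  induction l generalizing d with
  | nil => simp at hm
  | cons p t ih =>
    simp only [List.map_cons, List.nodup_cons] at hnd
    rcases List.mem_cons.mp hm with he | ht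
    · have hp1 : p.1 = k := by rw [← he]
      have hany : t.any (fun q => q.1 == k) = false := by
        rw [List.any_eq_false]
        intro q hq
        simp only [beq_iff_eq]
        intro hqk
        apply hnd.1
        have hmem : q.1 ∈ t.map (fun p => p.1) := List.mem_map.mpr ⟨q, hq, rfl⟩
        rw [hqk, ← hp1] at hmem
        exact hmem
      simp only [List.foldl_cons]
      rw [pvWb_getD_not_mem _ _ _ hany, ← he]
      rw [PySem.Dict.getD_insert_self]
    · simp only [List.foldl_cons]
      exact ih _ hnd.2 ht

-- inserting at a key the dict already holds commutes with any other insert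
theorem pvInsert_comm (d : PySem.Dict String String) (k k' v w : String)
    (hk : d.contains k = true) (hne : k' ≠ k) :
    (d.insert k' v).insert k w = (d.insert k w).insert k' v := by
  have hne' : k ≠ k' := fun h => hne h.symm
  by_cases hk' : d.contains k' = true
  · apply PySem.Dict.ext
    have c1 : (d.insert k' v).contains k = true := by
      rw [PySem.Dict.contains_insert, hk]; simp
    have c2 : (d.insert k w).contains k' = true := by
      rw [PySem.Dict.contains_insert, hk']; simp
    rw [PySem.Dict.items_insert_of_contains _ _ c1, PySem.Dict.items_insert_of_contains _ _ hk',
        PySem.Dict.items_insert_of_contains _ _ c2, PySem.Dict.items_insert_of_contains _ _ hk]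
    rw [List.map_map, List.map_map]
    apply List.map_congr_left
    intro p _
    simp only [Function.comp_apply]
    by_cases h1 : p.1 = k'
    · simp [h1, hne]
    · by_cases h2 : p.1 = k
      · simp [h2, hne']
      · simp [h1, h2]
  · have hk'f : d.contains k' = false := by simpa using hk'
    apply PySem.Dict.ext
    have c1 : (d.insert k' v).contains k = true := by
      rw [PySem.Dict.contains_insert, hk]; simp
    have c2 : (d.insert k w).contains k' = false := by
      rw [PySem.Dict.contains_insert, hk'f]; simp [hne]
    rw [PySem.Dict.items_insert_of_contains _ _ c1, PySem.Dict.items_insert_of_not_contains _ _ hk'f,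
        PySem.Dict.items_insert_of_not_contains _ _ c2, PySem.Dict.items_insert_of_contains _ _ hk]
    rw [List.map_append]
    simp [hne]

theorem pvWb_push_insert (t : List (String × List String)) (d : PySem.Dict String String)
    (k w : String) (h : t.any (fun p => p.1 == k) = false) (hk : d.contains k = true) :
    (t.foldl (fun d p => d.insert p.1 (pvJoin p.2)) d).insert k w
      = t.foldl (fun d p => d.insert p.1 (pvJoin p.2)) (d.insert k w) := by
  induction t generalizing d with
  | nil => rfl
  | cons p t ih =>
    simp only [List.any_cons, Bool.or_eq_false_iff] at h
    have hne : p.1 ≠ k := by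
      intro he
      rw [he] at h
      simp at h
    simp only [List.foldl_cons]
    rw [ih _ h.2 (by rw [PySem.Dict.contains_insert, hk]; simp)]
    rw [pvInsert_comm _ _ _ _ _ hk hne]

theorem pvWb_map_noop (t : List (String × List String)) (k : String) (l : List String)
    (h : t.any (fun p => p.1 == k) = false) :
    t.map (fun p => if p.1 == k then (k, l) else p) = t := by
  induction t with
  | nil => rfl
  | cons p t ih =>
    simp only [List.any_cons, Bool.or_eq_false_iff] at h
    simp only [List.map_cons, if_neg (by simp [h.1] : ¬ ((p.1 == k) = true)), ih h.2]

theorem pvWb_map_replace (t : List (String × List String)) (d : PySem.Dict String String)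
    (k : String) (l : List String)
    (hnd : (t.map (fun p => p.1)).Nodup) (hc : t.any (fun p => p.1 == k) = true) :
    (t.map (fun p => if p.1 == k then (k, l) else p)).foldl (fun d p => d.insert p.1 (pvJoin p.2)) d
      = (t.foldl (fun d p => d.insert p.1 (pvJoin p.2)) d).insert k (pvJoin l) := by
  induction t generalizing d with
  | nil => simp at hc
  | cons p t ih =>
    simp only [List.map_cons, List.nodup_cons] at hnd
    by_cases hp : (p.1 == k) = true
    · have hp1 : p.1 = k := by simpa using hp
      have hany : t.any (fun q => q.1 == k) = false := by
        rw [List.any_eq_false]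
        intro q hq
        simp only [beq_iff_eq]
        intro hqk
        apply hnd.1
        have hmem : q.1 ∈ t.map (fun p => p.1) := List.mem_map.mpr ⟨q, hq, rfl⟩
        rw [hqk, ← hp1] at hmem
        exact hmem
      have hcont : (d.insert p.1 (pvJoin p.2)).contains k = true := by
        rw [hp1]; exact PySem.Dict.contains_insert_self _ _ _
      simp only [List.map_cons, if_pos hp, List.foldl_cons]
      rw [pvWb_map_noop _ _ _ hany, pvWb_push_insert _ _ _ _ hany hcont, hp1,
          PySem.Dict.insert_insert_self]
    · have hc' : t.any (fun q => q.1 == k) = true := by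
        simp only [List.any_cons, hp, Bool.false_or] at hc
        exact hc
      simp only [List.map_cons, if_neg hp, List.foldl_cons]
      exact ih _ hnd.2 hc'

theorem pvWb_insert (d0 : PySem.Dict String String) (acc : PySem.Dict String (List String))
    (k : String) (l : List String) (hnd : acc.keys.Nodup) :
    pvWriteback d0 (acc.insert k l) = (pvWriteback d0 acc).insert k (pvJoin l) := by
  unfold pvWriteback
  by_cases hc : acc.contains k = true
  · rw [PySem.Dict.items_insert_of_contains _ _ hc]
    exact pvWb_map_replace _ _ _ _ hnd hc
  · rw [PySem.Dict.items_insert_of_not_contains _ _ (by simpa using hc), List.foldl_append]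
    rfl

theorem pvWb_containsD (d0 : PySem.Dict String String) (acc : PySem.Dict String (List String)) (k : String) :
    (pvWriteback d0 acc).contains k = (acc.contains k || d0.contains k) := by
  unfold pvWriteback
  exact pvWb_contains _ _ _

theorem pvWb_getD_absent (d0 : PySem.Dict String String) (acc : PySem.Dict String (List String))
    (k : String) (h : acc.contains k = false) :
    (pvWriteback d0 acc).getD k "" = d0.getD k "" := by
  unfold pvWriteback
  exact pvWb_getD_not_mem _ _ _ h

theorem pvContains_exists (acc : PySem.Dict String (List String)) (k : String)
    (h : acc.contains k = true) : ∃ ps, acc.get? k = some ps := by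
  rw [PySem.Dict.contains_eq_isSome_get?] at h
  exact Option.isSome_iff_exists.mp h

theorem pvWb_getD_present (d0 : PySem.Dict String String) (acc : PySem.Dict String (List String))
    (k : String) (ps : List String) (hnd : acc.keys.Nodup) (h : acc.get? k = some ps) :
    (pvWriteback d0 acc).getD k "" = pvJoin ps := by
  unfold pvWriteback
  exact pvWb_getD_mem _ _ _ _ hnd (PySem.Dict.mem_items_of_get?_eq_some _ h)

-- ---- gather characterisation ----
def pvSeed (ffd : PySem.Dict String String) (acc : PySem.Dict String (List String))
    (key seedkey : String) : List String :=
  if acc.contains key then acc.getD key []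
  else if ffd.contains seedkey then [ffd.getD key ""] else []

theorem pvGather_eq (ffd : PySem.Dict String String) (acc : PySem.Dict String (List String))
    (key frag seedkey : String) :
    pvGather ffd acc key frag seedkey = acc.insert key (pvSeed ffd acc key seedkey ++ [frag]) := by
  unfold pvGather pvSeed
  by_cases hc : acc.contains key = true
  · rw [if_neg (show ¬ ((!(acc.contains key)) = true) by rw [hc]; simp), if_pos hc]
    simp only [PySem.Dict.modify]
  · have hcf : acc.contains key = false := by simpa using hc
    rw [if_pos (show (!(acc.contains key)) = true by rw [hcf]; rfl),
        if_neg (show ¬ (acc.contains key = true) by rw [hcf]; simp)]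
    simp only [PySem.Dict.modify]
    rw [PySem.Dict.getD_insert_self, PySem.Dict.insert_insert_self]

theorem pvGather_nodup (ffd : PySem.Dict String String) (acc : PySem.Dict String (List String))
    (key frag seedkey : String) (h : acc.keys.Nodup) : (pvGather ffd acc key frag seedkey).keys.Nodup := by
  rw [pvGather_eq]
  exact PySem.Dict.nodup_keys_insert _ _ _ h

theorem pvWb_gather (d0 : PySem.Dict String String) (acc : PySem.Dict String (List String))
    (key frag seedkey : String) (hnd : acc.keys.Nodup) :
    pvWriteback d0 (pvGather d0 acc key frag seedkey)
      = (pvWriteback d0 acc).insert key (pvJoin (pvSeed d0 acc key seedkey ++ [frag])) := by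
  rw [pvGather_eq, pvWb_insert _ _ _ _ hnd]

theorem pvContains_insert_of_ne (acc : PySem.Dict String (List String)) (k k' : String)
    (l : List String) (hne : k' ≠ k) : (acc.insert k l).contains k' = acc.contains k' := by
  rw [PySem.Dict.contains_insert]
  simp [hne]

theorem pvContains_gather_of_ne (ffd : PySem.Dict String String) (acc : PySem.Dict String (List String))
    (key frag seedkey k' : String) (hne : k' ≠ key) :
    (pvGather ffd acc key frag seedkey).contains k' = acc.contains k' := by
  rw [pvGather_eq]
  exact pvContains_insert_of_ne _ _ _ _ hne

-- ---- the loop invariant ----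
def pvWrittenKeys : List String :=
  ["tablevar","tablevar2","tablevar_rename","annotvar","annotvar2","annotvar_rename",
   "groupby","groupby2","joinkey","valuevar2"]

def pvInv (acc : PySem.Dict String (List String)) : Prop :=
  acc.keys.Nodup ∧ (∀ k ∈ acc.keys, k ∈ pvWrittenKeys) ∧
  acc.contains "tablevar2" = acc.contains "tablevar_rename" ∧
  acc.contains "annotvar2" = acc.contains "annotvar_rename" ∧
  (∀ p ∈ acc.items, p.2 ≠ [])

theorem pvNotWritten (acc : PySem.Dict String (List String)) (k : String)
    (hInv : pvInv acc) (hnw : k ∉ pvWrittenKeys) : acc.contains k = false := by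
  cases e : acc.contains k with
  | false => rfl
  | true =>
    have h2 : decide (k ∈ acc.keys) = true := by
      rw [← PySem.Dict.contains_eq_decide_mem_keys]; exact e
    exact absurd (hInv.2.1 _ (of_decide_eq_true h2)) hnw

theorem pvInv_insert_simple (acc : PySem.Dict String (List String)) (k : String) (l : List String)
    (hInv : pvInv acc) (hkW : k ∈ pvWrittenKeys) (hl : l ≠ [])
    (b1 : ("tablevar2" : String) ≠ k) (b2 : ("tablevar_rename" : String) ≠ k)
    (b3 : ("annotvar2" : String) ≠ k) (b4 : ("annotvar_rename" : String) ≠ k) :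
    pvInv (acc.insert k l) := by
  obtain ⟨i1, i2, i3, i4, i5⟩ := hInv
  refine ⟨PySem.Dict.nodup_keys_insert _ _ _ i1, ?_, ?_, ?_, ?_⟩
  · intro x hx
    rcases (PySem.Dict.mem_keys_insert _ _ _ _).mp hx with he | hm
    · rw [he]; exact hkW
    · exact i2 _ hm
  · rw [pvContains_insert_of_ne _ _ _ _ b1, pvContains_insert_of_ne _ _ _ _ b2]; exact i3
  · rw [pvContains_insert_of_ne _ _ _ _ b3, pvContains_insert_of_ne _ _ _ _ b4]; exact i4
  · intro p hp
    rcases (PySem.Dict.mem_items_insert _ _ _ _).mp hp with he | ⟨hm, _⟩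
    · rw [he]; exact hl
    · exact i5 _ hm

theorem pvInv_gather_simple (d0 : PySem.Dict String String) (acc : PySem.Dict String (List String))
    (k frag : String) (hInv : pvInv acc) (hkW : k ∈ pvWrittenKeys)
    (b1 : ("tablevar2" : String) ≠ k) (b2 : ("tablevar_rename" : String) ≠ k)
    (b3 : ("annotvar2" : String) ≠ k) (b4 : ("annotvar_rename" : String) ≠ k) :
    pvInv (pvGather d0 acc k frag k) := by
  rw [pvGather_eq]
  exact pvInv_insert_simple _ _ _ hInv hkW (by simp) b1 b2 b3 b4

theorem pvInv_pairT (acc : PySem.Dict String (List String)) (l2 lr : List String)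
    (hInv : pvInv acc) (hl2 : l2 ≠ []) (hlr : lr ≠ []) :
    pvInv ((acc.insert "tablevar2" l2).insert "tablevar_rename" lr) := by
  obtain ⟨i1, i2, i3, i4, i5⟩ := hInv
  refine ⟨PySem.Dict.nodup_keys_insert _ _ _ (PySem.Dict.nodup_keys_insert _ _ _ i1), ?_, ?_, ?_, ?_⟩
  · intro x hx
    rcases (PySem.Dict.mem_keys_insert _ _ _ _).mp hx with he | hx2
    · rw [he]; decide
    rcases (PySem.Dict.mem_keys_insert _ _ _ _).mp hx2 with he | hx3
    · rw [he]; decide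
    · exact i2 _ hx3
  · rw [pvContains_insert_of_ne _ _ _ _ (by decide), PySem.Dict.contains_insert_self,
        PySem.Dict.contains_insert_self]
  · rw [pvContains_insert_of_ne _ _ _ _ (by decide), pvContains_insert_of_ne _ _ _ _ (by decide),
        pvContains_insert_of_ne _ _ _ _ (by decide), pvContains_insert_of_ne _ _ _ _ (by decide)]
    exact i4
  · intro p hp
    rcases (PySem.Dict.mem_items_insert _ _ _ _).mp hp with he | ⟨hp2, _⟩
    · rw [he]; exact hlr
    rcases (PySem.Dict.mem_items_insert _ _ _ _).mp hp2 with he | ⟨hp3, _⟩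
    · rw [he]; exact hl2
    · exact i5 _ hp3

theorem pvInv_pairA (acc : PySem.Dict String (List String)) (l2 lr : List String)
    (hInv : pvInv acc) (hl2 : l2 ≠ []) (hlr : lr ≠ []) :
    pvInv ((acc.insert "annotvar2" l2).insert "annotvar_rename" lr) := by
  obtain ⟨i1, i2, i3, i4, i5⟩ := hInv
  refine ⟨PySem.Dict.nodup_keys_insert _ _ _ (PySem.Dict.nodup_keys_insert _ _ _ i1), ?_, ?_, ?_, ?_⟩
  · intro x hx
    rcases (PySem.Dict.mem_keys_insert _ _ _ _).mp hx with he | hx2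
    · rw [he]; decide
    rcases (PySem.Dict.mem_keys_insert _ _ _ _).mp hx2 with he | hx3
    · rw [he]; decide
    · exact i2 _ hx3
  · rw [pvContains_insert_of_ne _ _ _ _ (by decide), pvContains_insert_of_ne _ _ _ _ (by decide),
        pvContains_insert_of_ne _ _ _ _ (by decide), pvContains_insert_of_ne _ _ _ _ (by decide)]
    exact i3
  · rw [pvContains_insert_of_ne _ _ _ _ (by decide), PySem.Dict.contains_insert_self,
        PySem.Dict.contains_insert_self]
  · intro p hp
    rcases (PySem.Dict.mem_items_insert _ _ _ _).mp hp with he | ⟨hp2, _⟩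
    · rw [he]; exact hlr
    rcases (PySem.Dict.mem_items_insert _ _ _ _).mp hp2 with he | ⟨hp3, _⟩
    · rw [he]; exact hl2
    · exact i5 _ hp3

theorem pvInv_gather_pairT (d0 : PySem.Dict String String) (acc : PySem.Dict String (List String))
    (f2 fr : String) (hInv : pvInv acc) :
    pvInv (pvGather d0 (pvGather d0 acc "tablevar2" f2 "tablevar2") "tablevar_rename" fr "tablevar2") := by
  rw [pvGather_eq, pvGather_eq]
  exact pvInv_pairT _ _ _ hInv (by simp) (by simp)

theorem pvInv_gather_pairA (d0 : PySem.Dict String String) (acc : PySem.Dict String (List String))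
    (f2 fr : String) (hInv : pvInv acc) :
    pvInv (pvGather d0 (pvGather d0 acc "annotvar2" f2 "annotvar2") "annotvar_rename" fr "annotvar2") := by
  rw [pvGather_eq, pvGather_eq]
  exact pvInv_pairA _ _ _ hInv (by simp) (by simp)

theorem pvInv_empty : pvInv PySem.Dict.empty := by
  refine ⟨List.nodup_nil, ?_, rfl, rfl, ?_⟩
  · intro k hk
    simp [PySem.Dict.keys, PySem.Dict.empty] at hk
  · intro p hp
    simp [PySem.Dict.empty] at hp

-- ---- pvAddItem at each literal mode (definitional) ----
theorem pvAddItem_tablevar (d : PySem.Dict String String) (ki qid : String) :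
    pvAddItem d "tablevar" ki qid
      = if (!(d.contains "tablevar")) = true then d.insert "tablevar" (d.getD ki "")
        else d.insert "tablevar" (d.getD "tablevar" "" ++ ",\n" ++ d.getD ki "") := rfl

theorem pvAddItem_annotvar (d : PySem.Dict String String) (ki qid : String) :
    pvAddItem d "annotvar" ki qid
      = if (!(d.contains "annotvar")) = true then d.insert "annotvar" (d.getD ki "")
        else d.insert "annotvar" (d.getD "annotvar" "" ++ ",\n" ++ d.getD ki "") := rfl

theorem pvAddItem_groupby (d : PySem.Dict String String) (ki qid : String) :
    pvAddItem d "groupby" ki qid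
      = if (!(d.contains "groupby")) = true then d.insert "groupby" (d.getD ki "")
        else d.insert "groupby" (d.getD "groupby" "" ++ ",\n" ++ d.getD ki "") := rfl

theorem pvAddItem_groupby2 (d : PySem.Dict String String) (ki qid : String) :
    pvAddItem d "groupby2" ki qid
      = if (!(d.contains "groupby2")) = true then d.insert "groupby2" (d.getD ki "" ++ "_J" ++ qid)
        else d.insert "groupby2" (d.getD "groupby2" "" ++ ",\n" ++ d.getD ki "" ++ "_J" ++ qid) := rfl

theorem pvAddItem_tablevar2 (d : PySem.Dict String String) (ki qid : String) :
    pvAddItem d "tablevar2" ki qid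
      = if (!(d.contains "tablevar2")) = true then
          (d.insert "tablevar2" (d.getD ki "" ++ " AS " ++ d.getD ki "" ++ "_J" ++ qid)).insert "tablevar_rename"
            ((d.insert "tablevar2" (d.getD ki "" ++ " AS " ++ d.getD ki "" ++ "_J" ++ qid)).getD ki "" ++ "_J" ++ qid)
        else
          (d.insert "tablevar2" (d.getD "tablevar2" "" ++ ",\n" ++ d.getD ki "" ++ " AS " ++ d.getD ki "" ++ "_J" ++ qid)).insert "tablevar_rename"
            ((d.insert "tablevar2" (d.getD "tablevar2" "" ++ ",\n" ++ d.getD ki "" ++ " AS " ++ d.getD ki "" ++ "_J" ++ qid)).getD "tablevar_rename" ""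
              ++ ",\n" ++ (d.insert "tablevar2" (d.getD "tablevar2" "" ++ ",\n" ++ d.getD ki "" ++ " AS " ++ d.getD ki "" ++ "_J" ++ qid)).getD ki "" ++ "_J" ++ qid) := rfl

theorem pvAddItem_annotvar2 (d : PySem.Dict String String) (ki qid : String) :
    pvAddItem d "annotvar2" ki qid
      = if (!(d.contains "annotvar2")) = true then
          (d.insert "annotvar2" (d.getD ki "" ++ " AS " ++ d.getD ki "" ++ "_J" ++ qid)).insert "annotvar_rename"
            ((d.insert "annotvar2" (d.getD ki "" ++ " AS " ++ d.getD ki "" ++ "_J" ++ qid)).getD ki "" ++ "_J" ++ qid)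
        else
          (d.insert "annotvar2" (d.getD "annotvar2" "" ++ ",\n" ++ d.getD ki "" ++ " AS " ++ d.getD ki "" ++ "_J" ++ qid)).insert "annotvar_rename"
            ((d.insert "annotvar2" (d.getD "annotvar2" "" ++ ",\n" ++ d.getD ki "" ++ " AS " ++ d.getD ki "" ++ "_J" ++ qid)).getD "annotvar_rename" ""
              ++ ",\n" ++ (d.insert "annotvar2" (d.getD "annotvar2" "" ++ ",\n" ++ d.getD ki "" ++ " AS " ++ d.getD ki "" ++ "_J" ++ qid)).getD ki "" ++ "_J" ++ qid) := rfl

-- ---- phase lemmas: each statement of A on the write-back state is a gather/insert on the accumulator ----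
theorem pvPhase_core (d0 : PySem.Dict String String) (acc : PySem.Dict String (List String))
    (k frag : String) (hInv : pvInv acc) :
    (if (!(pvWriteback d0 acc).contains k) = true
     then (pvWriteback d0 acc).insert k frag
     else (pvWriteback d0 acc).insert k ((pvWriteback d0 acc).getD k "" ++ ",\n" ++ frag))
      = pvWriteback d0 (pvGather d0 acc k frag k) := by
  have hnd := hInv.1
  rw [pvWb_gather _ _ _ _ _ hnd]
  by_cases hc : acc.contains k = true
  · obtain ⟨ps, hps⟩ := pvContains_exists _ _ hc
    have hW : (pvWriteback d0 acc).contains k = true := by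
      rw [pvWb_containsD, hc, Bool.true_or]
    have hseed : pvSeed d0 acc k k = ps := by
      unfold pvSeed
      rw [if_pos hc, PySem.Dict.getD_eq_get?_getD acc k [], hps, Option.getD_some]
    have hne : ps ≠ [] := hInv.2.2.2.2 _ (PySem.Dict.mem_items_of_get?_eq_some _ hps)
    rw [hseed, if_neg (show ¬ ((!(pvWriteback d0 acc).contains k) = true) by rw [hW]; simp),
        pvJoin_append _ _ hne, pvWb_getD_present _ _ _ _ hnd hps]
  · have hcf : acc.contains k = false := by simpa using hc
    by_cases hd : d0.contains k = true
    · have hW : (pvWriteback d0 acc).contains k = true := by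
        rw [pvWb_containsD, hcf, hd, Bool.false_or]
      have hseed : pvSeed d0 acc k k = [d0.getD k ""] := by
        unfold pvSeed
        rw [if_neg (show ¬ (acc.contains k = true) by rw [hcf]; simp), if_pos hd]
      rw [hseed, if_neg (show ¬ ((!(pvWriteback d0 acc).contains k) = true) by rw [hW]; simp),
          pvJoin_append _ _ (by simp), pvJoin_singleton, pvWb_getD_absent _ _ _ hcf]
    · have hdf : d0.contains k = false := by simpa using hd
      have hW : (pvWriteback d0 acc).contains k = false := by
        rw [pvWb_containsD, hcf, hdf]; rfl
      have hseed : pvSeed d0 acc k k = [] := by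
        unfold pvSeed
        rw [if_neg (show ¬ (acc.contains k = true) by rw [hcf]; simp),
            if_neg (show ¬ (d0.contains k = true) by rw [hdf]; simp)]
      rw [hseed, if_pos (show (!(pvWriteback d0 acc).contains k) = true by rw [hW]; rfl),
          List.nil_append, pvJoin_singleton]

theorem pvPhase_tablevar (d0 : PySem.Dict String String) (acc : PySem.Dict String (List String))
    (ki qid : String) (hInv : pvInv acc) (hki : acc.contains ki = false) :
    pvAddItem (pvWriteback d0 acc) "tablevar" ki qid
      = pvWriteback d0 (pvGather d0 acc "tablevar" (d0.getD ki "") "tablevar") := by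
  rw [pvAddItem_tablevar, pvWb_getD_absent _ _ _ hki]
  exact pvPhase_core d0 acc "tablevar" (d0.getD ki "") hInv

theorem pvPhase_annotvar (d0 : PySem.Dict String String) (acc : PySem.Dict String (List String))
    (ki qid : String) (hInv : pvInv acc) (hki : acc.contains ki = false) :
    pvAddItem (pvWriteback d0 acc) "annotvar" ki qid
      = pvWriteback d0 (pvGather d0 acc "annotvar" (d0.getD ki "") "annotvar") := by
  rw [pvAddItem_annotvar, pvWb_getD_absent _ _ _ hki]
  exact pvPhase_core d0 acc "annotvar" (d0.getD ki "") hInv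

theorem pvPhase_groupby (d0 : PySem.Dict String String) (acc : PySem.Dict String (List String))
    (ki qid : String) (hInv : pvInv acc) (hki : acc.contains ki = false) :
    pvAddItem (pvWriteback d0 acc) "groupby" ki qid
      = pvWriteback d0 (pvGather d0 acc "groupby" (d0.getD ki "") "groupby") := by
  rw [pvAddItem_groupby, pvWb_getD_absent _ _ _ hki]
  exact pvPhase_core d0 acc "groupby" (d0.getD ki "") hInv

theorem pvPhase_groupby2 (d0 : PySem.Dict String String) (acc : PySem.Dict String (List String))
    (ki qid : String) (hInv : pvInv acc) (hki : acc.contains ki = false) :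
    pvAddItem (pvWriteback d0 acc) "groupby2" ki qid
      = pvWriteback d0 (pvGather d0 acc "groupby2" (d0.getD ki "" ++ "_J" ++ qid) "groupby2") := by
  rw [pvAddItem_groupby2, pvWb_getD_absent _ _ _ hki]
  have hs : (pvWriteback d0 acc).getD "groupby2" "" ++ ",\n" ++ d0.getD ki "" ++ "_J" ++ qid
      = (pvWriteback d0 acc).getD "groupby2" "" ++ ",\n" ++ (d0.getD ki "" ++ "_J" ++ qid) := by
    simp [String.append_assoc]
  rw [hs]
  exact pvPhase_core d0 acc "groupby2" (d0.getD ki "" ++ "_J" ++ qid) hInv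

theorem pvPhase_pairT (d0 : PySem.Dict String String) (acc : PySem.Dict String (List String))
    (ki qid : String) (hInv : pvInv acc) (hki : acc.contains ki = false) (hnekt : ki ≠ "tablevar2") :
    pvAddItem (pvWriteback d0 acc) "tablevar2" ki qid
      = pvWriteback d0 (pvGather d0
          (pvGather d0 acc "tablevar2" (d0.getD ki "" ++ " AS " ++ d0.getD ki "" ++ "_J" ++ qid) "tablevar2")
          "tablevar_rename" (d0.getD ki "" ++ "_J" ++ qid) "tablevar2") := by
  have hnd := hInv.1
  rw [pvAddItem_tablevar2]
  simp only [PySem.Dict.getD_insert_of_ne _ _ _ hnekt,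
    PySem.Dict.getD_insert_of_ne _ _ _ (show ("tablevar_rename" : String) ≠ "tablevar2" by decide)]
  rw [pvWb_getD_absent _ _ _ hki]
  rw [pvWb_gather _ _ _ _ _ (pvGather_nodup _ _ _ _ _ hnd), pvWb_gather _ _ _ _ _ hnd]
  have hseedr0 : pvSeed d0 (pvGather d0 acc "tablevar2" (d0.getD ki "" ++ " AS " ++ d0.getD ki "" ++ "_J" ++ qid) "tablevar2") "tablevar_rename" "tablevar2"
      = (if acc.contains "tablevar_rename" = true then acc.getD "tablevar_rename" []
         else if d0.contains "tablevar2" = true then [d0.getD "tablevar_rename" ""] else []) := by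
    unfold pvSeed
    rw [pvContains_gather_of_ne _ _ _ _ _ _ (show ("tablevar_rename" : String) ≠ "tablevar2" by decide), pvGather_eq,
        PySem.Dict.getD_insert_of_ne _ _ _ (show ("tablevar_rename" : String) ≠ "tablevar2" by decide)]
  rw [hseedr0]
  by_cases hc : acc.contains "tablevar2" = true
  · have hcr : acc.contains "tablevar_rename" = true := by rw [← hInv.2.2.1]; exact hc
    obtain ⟨ps2, hps2⟩ := pvContains_exists _ _ hc
    obtain ⟨psr, hpsr⟩ := pvContains_exists _ _ hcr
    have hne2 : ps2 ≠ [] := hInv.2.2.2.2 _ (PySem.Dict.mem_items_of_get?_eq_some _ hps2)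
    have hner : psr ≠ [] := hInv.2.2.2.2 _ (PySem.Dict.mem_items_of_get?_eq_some _ hpsr)
    have hW : (pvWriteback d0 acc).contains "tablevar2" = true := by
      rw [pvWb_containsD, hc, Bool.true_or]
    have hs2 : pvSeed d0 acc "tablevar2" "tablevar2" = ps2 := by
      unfold pvSeed
      rw [if_pos hc, PySem.Dict.getD_eq_get?_getD acc "tablevar2" [], hps2, Option.getD_some]
    have hsr : (if acc.contains "tablevar_rename" = true then acc.getD "tablevar_rename" []
        else if d0.contains "tablevar2" = true then [d0.getD "tablevar_rename" ""] else []) = psr := by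
      rw [if_pos hcr, PySem.Dict.getD_eq_get?_getD acc "tablevar_rename" [], hpsr, Option.getD_some]
    rw [hs2, hsr, if_neg (show ¬ ((!(pvWriteback d0 acc).contains "tablevar2") = true) by rw [hW]; simp),
        pvJoin_append _ _ hne2, pvJoin_append _ _ hner,
        pvWb_getD_present _ _ _ _ hnd hps2, pvWb_getD_present _ _ _ _ hnd hpsr]
    simp [String.append_assoc]
  · have hcf : acc.contains "tablevar2" = false := by simpa using hc
    have hcrf : acc.contains "tablevar_rename" = false := by rw [← hInv.2.2.1]; exact hcf
    by_cases hd : d0.contains "tablevar2" = true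
    · have hW : (pvWriteback d0 acc).contains "tablevar2" = true := by
        rw [pvWb_containsD, hcf, hd, Bool.false_or]
      have hs2 : pvSeed d0 acc "tablevar2" "tablevar2" = [d0.getD "tablevar2" ""] := by
        unfold pvSeed
        rw [if_neg (show ¬ (acc.contains "tablevar2" = true) by rw [hcf]; simp), if_pos hd]
      have hsr : (if acc.contains "tablevar_rename" = true then acc.getD "tablevar_rename" []
          else if d0.contains "tablevar2" = true then [d0.getD "tablevar_rename" ""] else []) = [d0.getD "tablevar_rename" ""] := by
        rw [if_neg (show ¬ (acc.contains "tablevar_rename" = true) by rw [hcrf]; simp), if_pos hd]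
      rw [hs2, hsr, if_neg (show ¬ ((!(pvWriteback d0 acc).contains "tablevar2") = true) by rw [hW]; simp),
          pvJoin_append _ _ (by simp), pvJoin_append _ _ (by simp),
          pvJoin_singleton, pvJoin_singleton,
          pvWb_getD_absent _ _ _ hcf, pvWb_getD_absent _ _ _ hcrf]
      simp [String.append_assoc]
    · have hdf : d0.contains "tablevar2" = false := by simpa using hd
      have hW : (pvWriteback d0 acc).contains "tablevar2" = false := by
        rw [pvWb_containsD, hcf, hdf]; rfl
      have hs2 : pvSeed d0 acc "tablevar2" "tablevar2" = [] := by
        unfold pvSeed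
        rw [if_neg (show ¬ (acc.contains "tablevar2" = true) by rw [hcf]; simp),
            if_neg (show ¬ (d0.contains "tablevar2" = true) by rw [hdf]; simp)]
      have hsr : (if acc.contains "tablevar_rename" = true then acc.getD "tablevar_rename" []
          else if d0.contains "tablevar2" = true then [d0.getD "tablevar_rename" ""] else []) = [] := by
        rw [if_neg (show ¬ (acc.contains "tablevar_rename" = true) by rw [hcrf]; simp),
            if_neg (show ¬ (d0.contains "tablevar2" = true) by rw [hdf]; simp)]
      rw [hs2, hsr, if_pos (show (!(pvWriteback d0 acc).contains "tablevar2") = true by rw [hW]; rfl)]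
      simp only [List.nil_append]
      rw [pvJoin_singleton, pvJoin_singleton]

theorem pvPhase_pairA (d0 : PySem.Dict String String) (acc : PySem.Dict String (List String))
    (ki qid : String) (hInv : pvInv acc) (hki : acc.contains ki = false) (hnekt : ki ≠ "annotvar2") :
    pvAddItem (pvWriteback d0 acc) "annotvar2" ki qid
      = pvWriteback d0 (pvGather d0
          (pvGather d0 acc "annotvar2" (d0.getD ki "" ++ " AS " ++ d0.getD ki "" ++ "_J" ++ qid) "annotvar2")
          "annotvar_rename" (d0.getD ki "" ++ "_J" ++ qid) "annotvar2") := by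
  have hnd := hInv.1
  rw [pvAddItem_annotvar2]
  simp only [PySem.Dict.getD_insert_of_ne _ _ _ hnekt,
    PySem.Dict.getD_insert_of_ne _ _ _ (show ("annotvar_rename" : String) ≠ "annotvar2" by decide)]
  rw [pvWb_getD_absent _ _ _ hki]
  rw [pvWb_gather _ _ _ _ _ (pvGather_nodup _ _ _ _ _ hnd), pvWb_gather _ _ _ _ _ hnd]
  have hseedr0 : pvSeed d0 (pvGather d0 acc "annotvar2" (d0.getD ki "" ++ " AS " ++ d0.getD ki "" ++ "_J" ++ qid) "annotvar2") "annotvar_rename" "annotvar2"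
      = (if acc.contains "annotvar_rename" = true then acc.getD "annotvar_rename" []
         else if d0.contains "annotvar2" = true then [d0.getD "annotvar_rename" ""] else []) := by
    unfold pvSeed
    rw [pvContains_gather_of_ne _ _ _ _ _ _ (show ("annotvar_rename" : String) ≠ "annotvar2" by decide), pvGather_eq,
        PySem.Dict.getD_insert_of_ne _ _ _ (show ("annotvar_rename" : String) ≠ "annotvar2" by decide)]
  rw [hseedr0]
  by_cases hc : acc.contains "annotvar2" = true
  · have hcr : acc.contains "annotvar_rename" = true := by rw [← hInv.2.2.2.1]; exact hc
    obtain ⟨ps2, hps2⟩ := pvContains_exists _ _ hc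
    obtain ⟨psr, hpsr⟩ := pvContains_exists _ _ hcr
    have hne2 : ps2 ≠ [] := hInv.2.2.2.2 _ (PySem.Dict.mem_items_of_get?_eq_some _ hps2)
    have hner : psr ≠ [] := hInv.2.2.2.2 _ (PySem.Dict.mem_items_of_get?_eq_some _ hpsr)
    have hW : (pvWriteback d0 acc).contains "annotvar2" = true := by
      rw [pvWb_containsD, hc, Bool.true_or]
    have hs2 : pvSeed d0 acc "annotvar2" "annotvar2" = ps2 := by
      unfold pvSeed
      rw [if_pos hc, PySem.Dict.getD_eq_get?_getD acc "annotvar2" [], hps2, Option.getD_some]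
    have hsr : (if acc.contains "annotvar_rename" = true then acc.getD "annotvar_rename" []
        else if d0.contains "annotvar2" = true then [d0.getD "annotvar_rename" ""] else []) = psr := by
      rw [if_pos hcr, PySem.Dict.getD_eq_get?_getD acc "annotvar_rename" [], hpsr, Option.getD_some]
    rw [hs2, hsr, if_neg (show ¬ ((!(pvWriteback d0 acc).contains "annotvar2") = true) by rw [hW]; simp),
        pvJoin_append _ _ hne2, pvJoin_append _ _ hner,
        pvWb_getD_present _ _ _ _ hnd hps2, pvWb_getD_present _ _ _ _ hnd hpsr]
    simp [String.append_assoc]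
  · have hcf : acc.contains "annotvar2" = false := by simpa using hc
    have hcrf : acc.contains "annotvar_rename" = false := by rw [← hInv.2.2.2.1]; exact hcf
    by_cases hd : d0.contains "annotvar2" = true
    · have hW : (pvWriteback d0 acc).contains "annotvar2" = true := by
        rw [pvWb_containsD, hcf, hd, Bool.false_or]
      have hs2 : pvSeed d0 acc "annotvar2" "annotvar2" = [d0.getD "annotvar2" ""] := by
        unfold pvSeed
        rw [if_neg (show ¬ (acc.contains "annotvar2" = true) by rw [hcf]; simp), if_pos hd]
      have hsr : (if acc.contains "annotvar_rename" = true then acc.getD "annotvar_rename" []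
          else if d0.contains "annotvar2" = true then [d0.getD "annotvar_rename" ""] else []) = [d0.getD "annotvar_rename" ""] := by
        rw [if_neg (show ¬ (acc.contains "annotvar_rename" = true) by rw [hcrf]; simp), if_pos hd]
      rw [hs2, hsr, if_neg (show ¬ ((!(pvWriteback d0 acc).contains "annotvar2") = true) by rw [hW]; simp),
          pvJoin_append _ _ (by simp), pvJoin_append _ _ (by simp),
          pvJoin_singleton, pvJoin_singleton,
          pvWb_getD_absent _ _ _ hcf, pvWb_getD_absent _ _ _ hcrf]
      simp [String.append_assoc]
    · have hdf : d0.contains "annotvar2" = false := by simpa using hd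
      have hW : (pvWriteback d0 acc).contains "annotvar2" = false := by
        rw [pvWb_containsD, hcf, hdf]; rfl
      have hs2 : pvSeed d0 acc "annotvar2" "annotvar2" = [] := by
        unfold pvSeed
        rw [if_neg (show ¬ (acc.contains "annotvar2" = true) by rw [hcf]; simp),
            if_neg (show ¬ (d0.contains "annotvar2" = true) by rw [hdf]; simp)]
      have hsr : (if acc.contains "annotvar_rename" = true then acc.getD "annotvar_rename" []
          else if d0.contains "annotvar2" = true then [d0.getD "annotvar_rename" ""] else []) = [] := by
        rw [if_neg (show ¬ (acc.contains "annotvar_rename" = true) by rw [hcrf]; simp),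
            if_neg (show ¬ (d0.contains "annotvar2" = true) by rw [hdf]; simp)]
      rw [hs2, hsr, if_pos (show (!(pvWriteback d0 acc).contains "annotvar2") = true by rw [hW]; rfl)]
      simp only [List.nil_append]
      rw [pvJoin_singleton, pvJoin_singleton]

-- the joinkey double-assignment of A, collapsed
def pvJK (qid : String) (d : PySem.Dict String String) (ki : String) : PySem.Dict String String :=
  (d.insert "joinkey" (d.getD ki "")).insert "joinkey"
    ((d.insert "joinkey" (d.getD ki "")).getD ki "" ++ "_J" ++ qid)

theorem pvPhase_joinkey (d0 : PySem.Dict String String) (acc : PySem.Dict String (List String))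
    (ki qid : String) (hInv : pvInv acc) (hki : acc.contains ki = false) (hne : ki ≠ "joinkey") :
    pvJK qid (pvWriteback d0 acc) ki
      = pvWriteback d0 (acc.insert "joinkey" [d0.getD ki "" ++ "_J" ++ qid]) := by
  unfold pvJK
  rw [PySem.Dict.getD_insert_of_ne _ _ _ hne, PySem.Dict.insert_insert_self,
      pvWb_getD_absent _ _ _ hki, pvWb_insert _ _ _ _ hInv.1, pvJoin_singleton]

theorem pvPhase_valuevar2 (d0 : PySem.Dict String String) (acc : PySem.Dict String (List String))
    (qid : String) (hInv : pvInv acc) (hkv : acc.contains "valuevar" = false) :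
    (pvWriteback d0 acc).insert "valuevar2" ((pvWriteback d0 acc).getD "valuevar" "" ++ "_J" ++ qid)
      = pvWriteback d0 (acc.insert "valuevar2" [d0.getD "valuevar" "" ++ "_J" ++ qid]) := by
  rw [pvWb_getD_absent _ _ _ hkv, pvWb_insert _ _ _ _ hInv.1, pvJoin_singleton]

-- ---- pvLoopA / pvLoopB at each trigger key (definitional) ----
theorem pvLoopA_tablekey (qid : String) (d : PySem.Dict String String) :
    pvLoopA qid d "tablekey" = pvAddItem (pvAddItem d "tablevar" "tablekey" qid) "tablevar2" "tablekey" qid := rfl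

theorem pvLoopA_tablejoin (qid : String) (d : PySem.Dict String String) :
    pvLoopA qid d "tablejoin"
      = pvJK qid (pvAddItem (pvAddItem d "tablevar" "tablejoin" qid) "tablevar2" "tablejoin" qid) "tablejoin" := rfl

set_option maxHeartbeats 1600000 in
theorem pvLoopA_tablegroup (qid : String) (d : PySem.Dict String String) :
    pvLoopA qid d "tablegroup"
      = pvAddItem (pvAddItem (pvAddItem (pvAddItem d "tablevar" "tablegroup" qid) "tablevar2" "tablegroup" qid) "groupby" "tablegroup" qid) "groupby2" "tablegroup" qid := rfl

theorem pvLoopA_valuevar (qid : String) (d : PySem.Dict String String) :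
    pvLoopA qid d "valuevar"
      = (pvAddItem (pvAddItem d "tablevar" "valuevar" qid) "tablevar2" "valuevar" qid).insert "valuevar2"
          ((pvAddItem (pvAddItem d "tablevar" "valuevar" qid) "tablevar2" "valuevar" qid).getD "valuevar" "" ++ "_J" ++ qid) := rfl

theorem pvLoopA_annotkey (qid : String) (d : PySem.Dict String String) :
    pvLoopA qid d "annotkey" = pvAddItem (pvAddItem d "annotvar" "annotkey" qid) "annotvar2" "annotkey" qid := rfl

theorem pvLoopA_annotjoin (qid : String) (d : PySem.Dict String String) :
    pvLoopA qid d "annotjoin"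
      = pvJK qid (pvAddItem (pvAddItem d "annotvar" "annotjoin" qid) "annotvar2" "annotjoin" qid) "annotjoin" := rfl

set_option maxHeartbeats 1600000 in
theorem pvLoopA_annotgroup (qid : String) (d : PySem.Dict String String) :
    pvLoopA qid d "annotgroup"
      = pvAddItem (pvAddItem (pvAddItem (pvAddItem d "annotvar" "annotgroup" qid) "annotvar2" "annotgroup" qid) "groupby" "annotgroup" qid) "groupby2" "annotgroup" qid := rfl

theorem pvLoopB_tablekey (ffd : PySem.Dict String String) (qid : String) (acc : PySem.Dict String (List String)) :
    pvLoopB ffd qid acc "tablekey"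
      = pvGather ffd (pvGather ffd (pvGather ffd acc "tablevar" (ffd.getD "tablekey" "") "tablevar")
          "tablevar2" (ffd.getD "tablekey" "" ++ " AS " ++ ffd.getD "tablekey" "" ++ "_J" ++ qid) "tablevar2")
          "tablevar_rename" (ffd.getD "tablekey" "" ++ "_J" ++ qid) "tablevar2" := rfl

theorem pvLoopB_tablejoin (ffd : PySem.Dict String String) (qid : String) (acc : PySem.Dict String (List String)) :
    pvLoopB ffd qid acc "tablejoin"
      = (pvGather ffd (pvGather ffd (pvGather ffd acc "tablevar" (ffd.getD "tablejoin" "") "tablevar")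
          "tablevar2" (ffd.getD "tablejoin" "" ++ " AS " ++ ffd.getD "tablejoin" "" ++ "_J" ++ qid) "tablevar2")
          "tablevar_rename" (ffd.getD "tablejoin" "" ++ "_J" ++ qid) "tablevar2").insert "joinkey"
          [ffd.getD "tablejoin" "" ++ "_J" ++ qid] := rfl

set_option maxHeartbeats 1600000 in
theorem pvLoopB_tablegroup (ffd : PySem.Dict String String) (qid : String) (acc : PySem.Dict String (List String)) :
    pvLoopB ffd qid acc "tablegroup"
      = pvGather ffd (pvGather ffd (pvGather ffd (pvGather ffd (pvGather ffd acc "tablevar" (ffd.getD "tablegroup" "") "tablevar")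
          "tablevar2" (ffd.getD "tablegroup" "" ++ " AS " ++ ffd.getD "tablegroup" "" ++ "_J" ++ qid) "tablevar2")
          "tablevar_rename" (ffd.getD "tablegroup" "" ++ "_J" ++ qid) "tablevar2")
          "groupby" (ffd.getD "tablegroup" "") "groupby")
          "groupby2" (ffd.getD "tablegroup" "" ++ "_J" ++ qid) "groupby2" := by
  simp [pvLoopB,
    show (["tablekey","tablejoin","tablegroup","valuevar"].contains ("tablegroup" : String)) = true from rfl,
    show (["annotkey","annotjoin","annotgroup"].contains ("tablegroup" : String)) = false from rfl,
    show (["annotgroup","tablegroup"].contains ("tablegroup" : String)) = true from rfl,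
    show (["annotjoin","tablejoin"].contains ("tablegroup" : String)) = false from rfl,
    show (("tablegroup" : String) == "valuevar") = false from rfl]

theorem pvLoopB_valuevar (ffd : PySem.Dict String String) (qid : String) (acc : PySem.Dict String (List String)) :
    pvLoopB ffd qid acc "valuevar"
      = (pvGather ffd (pvGather ffd (pvGather ffd acc "tablevar" (ffd.getD "valuevar" "") "tablevar")
          "tablevar2" (ffd.getD "valuevar" "" ++ " AS " ++ ffd.getD "valuevar" "" ++ "_J" ++ qid) "tablevar2")
          "tablevar_rename" (ffd.getD "valuevar" "" ++ "_J" ++ qid) "tablevar2").insert "valuevar2"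
          [ffd.getD "valuevar" "" ++ "_J" ++ qid] := rfl

theorem pvLoopB_annotkey (ffd : PySem.Dict String String) (qid : String) (acc : PySem.Dict String (List String)) :
    pvLoopB ffd qid acc "annotkey"
      = pvGather ffd (pvGather ffd (pvGather ffd acc "annotvar" (ffd.getD "annotkey" "") "annotvar")
          "annotvar2" (ffd.getD "annotkey" "" ++ " AS " ++ ffd.getD "annotkey" "" ++ "_J" ++ qid) "annotvar2")
          "annotvar_rename" (ffd.getD "annotkey" "" ++ "_J" ++ qid) "annotvar2" := rfl

theorem pvLoopB_annotjoin (ffd : PySem.Dict String String) (qid : String) (acc : PySem.Dict String (List String)) :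
    pvLoopB ffd qid acc "annotjoin"
      = (pvGather ffd (pvGather ffd (pvGather ffd acc "annotvar" (ffd.getD "annotjoin" "") "annotvar")
          "annotvar2" (ffd.getD "annotjoin" "" ++ " AS " ++ ffd.getD "annotjoin" "" ++ "_J" ++ qid) "annotvar2")
          "annotvar_rename" (ffd.getD "annotjoin" "" ++ "_J" ++ qid) "annotvar2").insert "joinkey"
          [ffd.getD "annotjoin" "" ++ "_J" ++ qid] := rfl

set_option maxHeartbeats 1600000 in
theorem pvLoopB_annotgroup (ffd : PySem.Dict String String) (qid : String) (acc : PySem.Dict String (List String)) :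
    pvLoopB ffd qid acc "annotgroup"
      = pvGather ffd (pvGather ffd (pvGather ffd (pvGather ffd (pvGather ffd acc "annotvar" (ffd.getD "annotgroup" "") "annotvar")
          "annotvar2" (ffd.getD "annotgroup" "" ++ " AS " ++ ffd.getD "annotgroup" "" ++ "_J" ++ qid) "annotvar2")
          "annotvar_rename" (ffd.getD "annotgroup" "" ++ "_J" ++ qid) "annotvar2")
          "groupby" (ffd.getD "annotgroup" "") "groupby")
          "groupby2" (ffd.getD "annotgroup" "" ++ "_J" ++ qid) "groupby2" := by
  simp [pvLoopB,
    show (["tablekey","tablejoin","tablegroup","valuevar"].contains ("annotgroup" : String)) = false from rfl,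
    show (["annotkey","annotjoin","annotgroup"].contains ("annotgroup" : String)) = true from rfl,
    show (["annotgroup","tablegroup"].contains ("annotgroup" : String)) = true from rfl,
    show (["annotjoin","tablejoin"].contains ("annotgroup" : String)) = false from rfl,
    show (("annotgroup" : String) == "valuevar") = false from rfl]

-- ---- the seven per-trigger step lemmas ----
theorem pvStep_tablekey (d0 : PySem.Dict String String) (qid : String) (acc : PySem.Dict String (List String))
    (hInv : pvInv acc) :
    pvLoopA qid (pvWriteback d0 acc) "tablekey" = pvWriteback d0 (pvLoopB d0 qid acc "tablekey")
      ∧ pvInv (pvLoopB d0 qid acc "tablekey") := by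
  have hki : acc.contains "tablekey" = false := pvNotWritten _ _ hInv (by decide)
  have hInv1 := pvInv_gather_simple d0 acc "tablevar" (d0.getD "tablekey" "") hInv (by decide) (by decide) (by decide) (by decide) (by decide)
  have hki1 : (pvGather d0 acc "tablevar" (d0.getD "tablekey" "") "tablevar").contains "tablekey" = false := by
    rw [pvContains_gather_of_ne _ _ _ _ _ _ (by decide)]; exact hki
  constructor
  · rw [pvLoopA_tablekey, pvLoopB_tablekey, pvPhase_tablevar _ _ _ _ hInv hki,
        pvPhase_pairT _ _ _ _ hInv1 hki1 (by decide)]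
  · rw [pvLoopB_tablekey]
    exact pvInv_gather_pairT _ _ _ _ hInv1

theorem pvStep_tablejoin (d0 : PySem.Dict String String) (qid : String) (acc : PySem.Dict String (List String))
    (hInv : pvInv acc) :
    pvLoopA qid (pvWriteback d0 acc) "tablejoin" = pvWriteback d0 (pvLoopB d0 qid acc "tablejoin")
      ∧ pvInv (pvLoopB d0 qid acc "tablejoin") := by
  have hki : acc.contains "tablejoin" = false := pvNotWritten _ _ hInv (by decide)
  have hInv1 := pvInv_gather_simple d0 acc "tablevar" (d0.getD "tablejoin" "") hInv (by decide) (by decide) (by decide) (by decide) (by decide)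
  have hki1 : (pvGather d0 acc "tablevar" (d0.getD "tablejoin" "") "tablevar").contains "tablejoin" = false := by
    rw [pvContains_gather_of_ne _ _ _ _ _ _ (by decide)]; exact hki
  have hInv2 := pvInv_gather_pairT d0 _ (d0.getD "tablejoin" "" ++ " AS " ++ d0.getD "tablejoin" "" ++ "_J" ++ qid) (d0.getD "tablejoin" "" ++ "_J" ++ qid) hInv1
  have hki2 : (pvGather d0 (pvGather d0 (pvGather d0 acc "tablevar" (d0.getD "tablejoin" "") "tablevar")
      "tablevar2" (d0.getD "tablejoin" "" ++ " AS " ++ d0.getD "tablejoin" "" ++ "_J" ++ qid) "tablevar2")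
      "tablevar_rename" (d0.getD "tablejoin" "" ++ "_J" ++ qid) "tablevar2").contains "tablejoin" = false := by
    rw [pvContains_gather_of_ne _ _ _ _ _ _ (by decide), pvContains_gather_of_ne _ _ _ _ _ _ (by decide)]
    exact hki1
  constructor
  · rw [pvLoopA_tablejoin, pvLoopB_tablejoin, pvPhase_tablevar _ _ _ _ hInv hki,
        pvPhase_pairT _ _ _ _ hInv1 hki1 (by decide),
        pvPhase_joinkey _ _ _ _ hInv2 hki2 (by decide)]
  · rw [pvLoopB_tablejoin]
    exact pvInv_insert_simple _ _ _ hInv2 (by decide) (by simp) (by decide) (by decide) (by decide) (by decide)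

theorem pvStep_tablegroup (d0 : PySem.Dict String String) (qid : String) (acc : PySem.Dict String (List String))
    (hInv : pvInv acc) :
    pvLoopA qid (pvWriteback d0 acc) "tablegroup" = pvWriteback d0 (pvLoopB d0 qid acc "tablegroup")
      ∧ pvInv (pvLoopB d0 qid acc "tablegroup") := by
  have hki : acc.contains "tablegroup" = false := pvNotWritten _ _ hInv (by decide)
  have hInv1 := pvInv_gather_simple d0 acc "tablevar" (d0.getD "tablegroup" "") hInv (by decide) (by decide) (by decide) (by decide) (by decide)
  have hki1 : (pvGather d0 acc "tablevar" (d0.getD "tablegroup" "") "tablevar").contains "tablegroup" = false := by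
    rw [pvContains_gather_of_ne _ _ _ _ _ _ (by decide)]; exact hki
  have hInv2 := pvInv_gather_pairT d0 _ (d0.getD "tablegroup" "" ++ " AS " ++ d0.getD "tablegroup" "" ++ "_J" ++ qid) (d0.getD "tablegroup" "" ++ "_J" ++ qid) hInv1
  have hki2 : (pvGather d0 (pvGather d0 (pvGather d0 acc "tablevar" (d0.getD "tablegroup" "") "tablevar")
      "tablevar2" (d0.getD "tablegroup" "" ++ " AS " ++ d0.getD "tablegroup" "" ++ "_J" ++ qid) "tablevar2")
      "tablevar_rename" (d0.getD "tablegroup" "" ++ "_J" ++ qid) "tablevar2").contains "tablegroup" = false := by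
    rw [pvContains_gather_of_ne _ _ _ _ _ _ (by decide), pvContains_gather_of_ne _ _ _ _ _ _ (by decide)]
    exact hki1
  have hInv3 := pvInv_gather_simple d0 _ "groupby" (d0.getD "tablegroup" "") hInv2 (by decide) (by decide) (by decide) (by decide) (by decide)
  have hki3 : (pvGather d0 (pvGather d0 (pvGather d0 (pvGather d0 acc "tablevar" (d0.getD "tablegroup" "") "tablevar")
      "tablevar2" (d0.getD "tablegroup" "" ++ " AS " ++ d0.getD "tablegroup" "" ++ "_J" ++ qid) "tablevar2")
      "tablevar_rename" (d0.getD "tablegroup" "" ++ "_J" ++ qid) "tablevar2")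
      "groupby" (d0.getD "tablegroup" "") "groupby").contains "tablegroup" = false := by
    rw [pvContains_gather_of_ne _ _ _ _ _ _ (by decide)]
    exact hki2
  constructor
  · rw [pvLoopA_tablegroup, pvLoopB_tablegroup, pvPhase_tablevar _ _ _ _ hInv hki,
        pvPhase_pairT _ _ _ _ hInv1 hki1 (by decide),
        pvPhase_groupby _ _ _ _ hInv2 hki2,
        pvPhase_groupby2 _ _ _ _ hInv3 hki3]
  · rw [pvLoopB_tablegroup]
    exact pvInv_gather_simple d0 _ "groupby2" _ hInv3 (by decide) (by decide) (by decide) (by decide) (by decide)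

theorem pvStep_valuevar (d0 : PySem.Dict String String) (qid : String) (acc : PySem.Dict String (List String))
    (hInv : pvInv acc) :
    pvLoopA qid (pvWriteback d0 acc) "valuevar" = pvWriteback d0 (pvLoopB d0 qid acc "valuevar")
      ∧ pvInv (pvLoopB d0 qid acc "valuevar") := by
  have hki : acc.contains "valuevar" = false := pvNotWritten _ _ hInv (by decide)
  have hInv1 := pvInv_gather_simple d0 acc "tablevar" (d0.getD "valuevar" "") hInv (by decide) (by decide) (by decide) (by decide) (by decide)
  have hki1 : (pvGather d0 acc "tablevar" (d0.getD "valuevar" "") "tablevar").contains "valuevar" = false := by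
    rw [pvContains_gather_of_ne _ _ _ _ _ _ (by decide)]; exact hki
  have hInv2 := pvInv_gather_pairT d0 _ (d0.getD "valuevar" "" ++ " AS " ++ d0.getD "valuevar" "" ++ "_J" ++ qid) (d0.getD "valuevar" "" ++ "_J" ++ qid) hInv1
  have hki2 : (pvGather d0 (pvGather d0 (pvGather d0 acc "tablevar" (d0.getD "valuevar" "") "tablevar")
      "tablevar2" (d0.getD "valuevar" "" ++ " AS " ++ d0.getD "valuevar" "" ++ "_J" ++ qid) "tablevar2")
      "tablevar_rename" (d0.getD "valuevar" "" ++ "_J" ++ qid) "tablevar2").contains "valuevar" = false := by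
    rw [pvContains_gather_of_ne _ _ _ _ _ _ (by decide), pvContains_gather_of_ne _ _ _ _ _ _ (by decide)]
    exact hki1
  constructor
  · rw [pvLoopA_valuevar, pvLoopB_valuevar, pvPhase_tablevar _ _ _ _ hInv hki,
        pvPhase_pairT _ _ _ _ hInv1 hki1 (by decide),
        pvPhase_valuevar2 _ _ _ hInv2 hki2]
  · rw [pvLoopB_valuevar]
    exact pvInv_insert_simple _ _ _ hInv2 (by decide) (by simp) (by decide) (by decide) (by decide) (by decide)

theorem pvStep_annotkey (d0 : PySem.Dict String String) (qid : String) (acc : PySem.Dict String (List String))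
    (hInv : pvInv acc) :
    pvLoopA qid (pvWriteback d0 acc) "annotkey" = pvWriteback d0 (pvLoopB d0 qid acc "annotkey")
      ∧ pvInv (pvLoopB d0 qid acc "annotkey") := by
  have hki : acc.contains "annotkey" = false := pvNotWritten _ _ hInv (by decide)
  have hInv1 := pvInv_gather_simple d0 acc "annotvar" (d0.getD "annotkey" "") hInv (by decide) (by decide) (by decide) (by decide) (by decide)
  have hki1 : (pvGather d0 acc "annotvar" (d0.getD "annotkey" "") "annotvar").contains "annotkey" = false := by
    rw [pvContains_gather_of_ne _ _ _ _ _ _ (by decide)]; exact hki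
  constructor
  · rw [pvLoopA_annotkey, pvLoopB_annotkey, pvPhase_annotvar _ _ _ _ hInv hki,
        pvPhase_pairA _ _ _ _ hInv1 hki1 (by decide)]
  · rw [pvLoopB_annotkey]
    exact pvInv_gather_pairA _ _ _ _ hInv1

theorem pvStep_annotjoin (d0 : PySem.Dict String String) (qid : String) (acc : PySem.Dict String (List String))
    (hInv : pvInv acc) :
    pvLoopA qid (pvWriteback d0 acc) "annotjoin" = pvWriteback d0 (pvLoopB d0 qid acc "annotjoin")
      ∧ pvInv (pvLoopB d0 qid acc "annotjoin") := by
  have hki : acc.contains "annotjoin" = false := pvNotWritten _ _ hInv (by decide)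
  have hInv1 := pvInv_gather_simple d0 acc "annotvar" (d0.getD "annotjoin" "") hInv (by decide) (by decide) (by decide) (by decide) (by decide)
  have hki1 : (pvGather d0 acc "annotvar" (d0.getD "annotjoin" "") "annotvar").contains "annotjoin" = false := by
    rw [pvContains_gather_of_ne _ _ _ _ _ _ (by decide)]; exact hki
  have hInv2 := pvInv_gather_pairA d0 _ (d0.getD "annotjoin" "" ++ " AS " ++ d0.getD "annotjoin" "" ++ "_J" ++ qid) (d0.getD "annotjoin" "" ++ "_J" ++ qid) hInv1
  have hki2 : (pvGather d0 (pvGather d0 (pvGather d0 acc "annotvar" (d0.getD "annotjoin" "") "annotvar")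
      "annotvar2" (d0.getD "annotjoin" "" ++ " AS " ++ d0.getD "annotjoin" "" ++ "_J" ++ qid) "annotvar2")
      "annotvar_rename" (d0.getD "annotjoin" "" ++ "_J" ++ qid) "annotvar2").contains "annotjoin" = false := by
    rw [pvContains_gather_of_ne _ _ _ _ _ _ (by decide), pvContains_gather_of_ne _ _ _ _ _ _ (by decide)]
    exact hki1
  constructor
  · rw [pvLoopA_annotjoin, pvLoopB_annotjoin, pvPhase_annotvar _ _ _ _ hInv hki,
        pvPhase_pairA _ _ _ _ hInv1 hki1 (by decide),
        pvPhase_joinkey _ _ _ _ hInv2 hki2 (by decide)]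
  · rw [pvLoopB_annotjoin]
    exact pvInv_insert_simple _ _ _ hInv2 (by decide) (by simp) (by decide) (by decide) (by decide) (by decide)

theorem pvStep_annotgroup (d0 : PySem.Dict String String) (qid : String) (acc : PySem.Dict String (List String))
    (hInv : pvInv acc) :
    pvLoopA qid (pvWriteback d0 acc) "annotgroup" = pvWriteback d0 (pvLoopB d0 qid acc "annotgroup")
      ∧ pvInv (pvLoopB d0 qid acc "annotgroup") := by
  have hki : acc.contains "annotgroup" = false := pvNotWritten _ _ hInv (by decide)
  have hInv1 := pvInv_gather_simple d0 acc "annotvar" (d0.getD "annotgroup" "") hInv (by decide) (by decide) (by decide) (by decide) (by decide)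
  have hki1 : (pvGather d0 acc "annotvar" (d0.getD "annotgroup" "") "annotvar").contains "annotgroup" = false := by
    rw [pvContains_gather_of_ne _ _ _ _ _ _ (by decide)]; exact hki
  have hInv2 := pvInv_gather_pairA d0 _ (d0.getD "annotgroup" "" ++ " AS " ++ d0.getD "annotgroup" "" ++ "_J" ++ qid) (d0.getD "annotgroup" "" ++ "_J" ++ qid) hInv1
  have hki2 : (pvGather d0 (pvGather d0 (pvGather d0 acc "annotvar" (d0.getD "annotgroup" "") "annotvar")
      "annotvar2" (d0.getD "annotgroup" "" ++ " AS " ++ d0.getD "annotgroup" "" ++ "_J" ++ qid) "annotvar2")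
      "annotvar_rename" (d0.getD "annotgroup" "" ++ "_J" ++ qid) "annotvar2").contains "annotgroup" = false := by
    rw [pvContains_gather_of_ne _ _ _ _ _ _ (by decide), pvContains_gather_of_ne _ _ _ _ _ _ (by decide)]
    exact hki1
  have hInv3 := pvInv_gather_simple d0 _ "groupby" (d0.getD "annotgroup" "") hInv2 (by decide) (by decide) (by decide) (by decide) (by decide)
  have hki3 : (pvGather d0 (pvGather d0 (pvGather d0 (pvGather d0 acc "annotvar" (d0.getD "annotgroup" "") "annotvar")
      "annotvar2" (d0.getD "annotgroup" "" ++ " AS " ++ d0.getD "annotgroup" "" ++ "_J" ++ qid) "annotvar2")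
      "annotvar_rename" (d0.getD "annotgroup" "" ++ "_J" ++ qid) "annotvar2")
      "groupby" (d0.getD "annotgroup" "") "groupby").contains "annotgroup" = false := by
    rw [pvContains_gather_of_ne _ _ _ _ _ _ (by decide)]
    exact hki2
  constructor
  · rw [pvLoopA_annotgroup, pvLoopB_annotgroup, pvPhase_annotvar _ _ _ _ hInv hki,
        pvPhase_pairA _ _ _ _ hInv1 hki1 (by decide),
        pvPhase_groupby _ _ _ _ hInv2 hki2,
        pvPhase_groupby2 _ _ _ _ hInv3 hki3]
  · rw [pvLoopB_annotgroup]
    exact pvInv_gather_simple d0 _ "groupby2" _ hInv3 (by decide) (by decide) (by decide) (by decide) (by decide)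

-- ---- the step and the fold ----
theorem pvStep (d0 : PySem.Dict String String) (qid : String) (acc : PySem.Dict String (List String))
    (ki : String) (hInv : pvInv acc) :
    pvLoopA qid (pvWriteback d0 acc) ki = pvWriteback d0 (pvLoopB d0 qid acc ki)
      ∧ pvInv (pvLoopB d0 qid acc ki) := by
  by_cases h1 : ki = "tablekey"
  · subst h1; exact pvStep_tablekey d0 qid acc hInv
  by_cases h2 : ki = "tablejoin"
  · subst h2; exact pvStep_tablejoin d0 qid acc hInv
  by_cases h3 : ki = "tablegroup"
  · subst h3; exact pvStep_tablegroup d0 qid acc hInv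
  by_cases h4 : ki = "valuevar"
  · subst h4; exact pvStep_valuevar d0 qid acc hInv
  by_cases h5 : ki = "annotkey"
  · subst h5; exact pvStep_annotkey d0 qid acc hInv
  by_cases h6 : ki = "annotjoin"
  · subst h6; exact pvStep_annotjoin d0 qid acc hInv
  by_cases h7 : ki = "annotgroup"
  · subst h7; exact pvStep_annotgroup d0 qid acc hInv
  have hB : pvLoopB d0 qid acc ki = acc := by
    simp [pvLoopB, h1, h2, h3, h4, h5, h6, h7]
  have hA : pvLoopA qid (pvWriteback d0 acc) ki = pvWriteback d0 acc := by
    simp [pvLoopA, h1, h2, h3, h4, h5, h6, h7]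
  rw [hA, hB]
  exact ⟨rfl, hInv⟩

theorem pvMain (d0 : PySem.Dict String String) (qid : String) :
    ∀ (ks : List String) (acc : PySem.Dict String (List String)), pvInv acc →
      ks.foldl (pvLoopA qid) (pvWriteback d0 acc) = pvWriteback d0 (ks.foldl (pvLoopB d0 qid) acc) := by
  intro ks
  induction ks with
  | nil => intro acc _; rfl
  | cons ki ks ih =>
    intro acc hInv
    obtain ⟨he, hi⟩ := pvStep d0 qid acc ki hInv
    simp only [List.foldl_cons]
    rw [he]
    exact ih _ hi

-- ===== VERDICT (by name: the statement is the Claim_ definition above) =====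
theorem updateFFdict_spec : Claim_equal_updateFFdict := by
  unfold Claim_equal_updateFFdict
  intro ffdict qid _ _
  unfold Spec_updateFFdict updateFFdict updateFFdict_alt
  exact congrArg PySem.Dict.items
    (pvMain (PySem.Dict.ofList ffdict) qid (PySem.Dict.ofList ffdict).keys PySem.Dict.empty pvInv_empty)
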